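-- pv_equiv track=rewrite | github.com/Ike28/UBB-FMI-Informatica | Anul I/Fundamentele programarii/Laborator/lab03/pb5-11.py | concat_rezulta_numar_cifre_ord_cresc
-- ===== SOURCE A (Python) =====
-- def concat_rezulta_numar_cifre_ord_cresc(list):
--     '''
--     Verifica daca o lista data ar duce la un numar cu cifre ordonate crescator prin concatenarea
--     elementelor
--     :param list: lista data
--     :return: True daca lista indeplineste proprietatea, False altfel
--     '''
--
--     numar = ''
--
--     for elem in list:
--         numar += str(elem)
--     for i in range(len(numar)-1):
--         if numar[i] > numar[i+1]:
--             return False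
--     return True
-- ===== SOURCE B (Python) =====
-- def concat_rezulta_numar_cifre_ord_cresc(list):
--     numar = ''.join(str(e) for e in list)
--     return numar == ''.join(sorted(numar))
-- ===== Notes on version B (the rewrite author's own statement) =====
-- stated objective: simpler
-- what changed: Replaces the index-based adjacent-pair scan with building the string once via join and comparing it to its sorted form (a string is non-decreasing iff it equals sorted(itself)).
import Mathlib
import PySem

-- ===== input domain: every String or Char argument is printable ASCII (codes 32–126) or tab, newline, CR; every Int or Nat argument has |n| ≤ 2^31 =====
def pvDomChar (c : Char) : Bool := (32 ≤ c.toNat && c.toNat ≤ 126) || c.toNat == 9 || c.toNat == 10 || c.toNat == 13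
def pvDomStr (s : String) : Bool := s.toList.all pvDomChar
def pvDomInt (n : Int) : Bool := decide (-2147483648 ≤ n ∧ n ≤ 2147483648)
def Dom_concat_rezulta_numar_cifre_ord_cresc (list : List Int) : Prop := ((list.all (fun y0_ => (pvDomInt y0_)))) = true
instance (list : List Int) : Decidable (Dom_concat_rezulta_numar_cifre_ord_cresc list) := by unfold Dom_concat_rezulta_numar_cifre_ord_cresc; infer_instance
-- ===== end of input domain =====

-- B replaces A's index-based adjacent-pair scan with comparing the concatenated string to its sorted form (simpler; return-value behaviour is identical).

-- ===== PORT A =====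
-- the 'for i in range(len(numar)-1): if numar[i] > numar[i+1]: return False' loop (indices always in range)
def pvChkA (cs : List Char) : List Int → Bool
  | [] => true
  | i :: rest =>
      if PySem.List.pyGetD cs (i + 1) ' ' < PySem.List.pyGetD cs i ' ' then false
      else pvChkA cs rest

def concat_rezulta_numar_cifre_ord_cresc (list : List Int) : Bool :=
  let numar : List Char := list.foldl (fun s e => s ++ PySem.Int.toChars e) []
  pvChkA numar (PySem.List.pyRange 0 ((numar.length : Int) - 1) 1)

-- ===== PORT B =====
def concat_rezulta_numar_cifre_ord_cresc_alt (list : List Int) : Bool :=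
  let numar : List Char := (list.map PySem.Int.toChars).flatten
  numar == PySem.List.sorted numar (fun c => c) false

-- ===== PRECONDITION & SPEC =====
def Spec_concat_rezulta_numar_cifre_ord_cresc (list : List Int) (out : Bool) : Prop := out = concat_rezulta_numar_cifre_ord_cresc_alt list
instance (list : List Int) (out : Bool) : Decidable (Spec_concat_rezulta_numar_cifre_ord_cresc list out) := by unfold Spec_concat_rezulta_numar_cifre_ord_cresc; infer_instance

-- ===== CLAIM (what is proved, stated in full; the proofs are below) =====
def Claim_equal_concat_rezulta_numar_cifre_ord_cresc : Prop := ∀ (list : List Int), Dom_concat_rezulta_numar_cifre_ord_cresc list → Spec_concat_rezulta_numar_cifre_ord_cresc list (concat_rezulta_numar_cifre_ord_cresc list)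

-- ===== LEMMAS AND PROOFS =====

-- A's concatenation loop equals B's join
theorem pv_concat_eq (list : List Int) :
    list.foldl (fun s e => s ++ PySem.Int.toChars e) [] = (list.map PySem.Int.toChars).flatten := by
  have h : ∀ (l : List Int) (acc : List Char),
      l.foldl (fun s e => s ++ PySem.Int.toChars e) acc = acc ++ (l.map PySem.Int.toChars).flatten := by
    intro l
    induction l with
    | nil => intro acc; simp
    | cons x t ih => intro acc; simp [List.foldl, ih]
  simp [h list []]

-- A's scan over range(a, len-1) checks exactly the adjacent pairs from index a on
theorem pv_chkA_iff (cs : List Char) (a : Nat) :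
    pvChkA cs (PySem.List.pyRange a ((cs.length : Int) - 1) 1) = true ↔
      ∀ i : Nat, a ≤ i → (h : i + 1 < cs.length) → cs[i] ≤ cs[i+1] := by
  by_cases hlt : (a : Int) < (cs.length : Int) - 1
  · have hterm : ((cs.length : Int) - 1 - a).toNat < ((cs.length : Int) - 1 - a).toNat + 1 := Nat.lt_succ_self _
    rw [PySem.List.pyRange_one_cons hlt]
    have ha1 : a + 1 < cs.length := by omega
    have hrec := pv_chkA_iff cs (a + 1)
    simp only [pvChkA]
    have hget : ∀ (k : Nat) (hk : k < cs.length), PySem.List.pyGetD cs (k : Int) ' ' = cs[k]'hk :=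
      fun k hk => by simp [PySem.List.pyGetD_natCast, List.getD_eq_getElem?_getD, hk]
    rw [show ((a : Int) + 1) = ((a + 1 : Nat) : Int) by push_cast; ring]
    rw [hget a (by omega), hget (a + 1) ha1]
    by_cases hcmp : cs[a + 1] < cs[a]
    · simp only [hcmp, if_true]
      constructor
      · intro hfalse; exact absurd hfalse (by simp)
      · intro hall
        exact absurd (hall a le_rfl (by omega)) (by exact fun hle => absurd hcmp (not_lt.mpr hle))
    · simp only [hcmp, if_false]
      rw [hrec]
      constructor
      · intro hall i hi hilen
        rcases Nat.eq_or_lt_of_le hi with rfl | hlt'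
        · exact not_lt.mp hcmp
        · exact hall i hlt' hilen
      · intro hall i hi hilen; exact hall i (by omega) hilen
  · rw [PySem.List.pyRange_one_eq_nil (by omega)]
    simp only [pvChkA, true_iff]
    intro i hi hilen
    omega
termination_by ((cs.length : Int) - 1 - a).toNat
decreasing_by omega

-- a list equals its sorted form iff it is pairwise non-decreasing
theorem pv_sorted_iff (cs : List Char) :
    (cs == PySem.List.sorted cs (fun c => c) false) = true ↔ cs.Pairwise (· ≤ ·) := by
  rw [beq_iff_eq]
  constructor
  · intro h
    have := PySem.List.sorted_pairwise cs (fun c => c) (κ := Char)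
    rw [← h] at this
    simpa using this
  · intro h
    exact (PySem.List.sorted_eq_self_of_pairwise cs (fun c => c) (by simpa using h)).symm

theorem concat_rezulta_numar_cifre_ord_cresc_eq (list : List Int) :
    concat_rezulta_numar_cifre_ord_cresc list = concat_rezulta_numar_cifre_ord_cresc_alt list := by
  unfold concat_rezulta_numar_cifre_ord_cresc concat_rezulta_numar_cifre_ord_cresc_alt
  simp only [pv_concat_eq]
  set cs := (list.map PySem.Int.toChars).flatten with hcs
  have hiff : (∀ i : Nat, 0 ≤ i → (h : i + 1 < cs.length) → cs[i] ≤ cs[i+1]) ↔ cs.Pairwise (· ≤ ·) := by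
    rw [← List.isChain_iff_pairwise, List.isChain_iff_getElem]
    constructor
    · intro h i hi; exact h i (Nat.zero_le _) (by omega)
    · intro h i _ hilen; exact h i (by omega)
  have h1 := pv_chkA_iff cs 0
  rw [Nat.cast_zero] at h1
  have h2 := pv_sorted_iff cs
  rw [hiff] at h1
  rw [← h2] at h1
  exact Bool.coe_iff_coe.mp (by rw [h1])

-- ===== VERDICT (by name: the statement is the Claim_ definition above) =====
theorem concat_rezulta_numar_cifre_ord_cresc_spec : Claim_equal_concat_rezulta_numar_cifre_ord_cresc := by
  intro list _
  exact concat_rezulta_numar_cifre_ord_cresc_eq list
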